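-- pv_equiv track=rewrite | github.com/Kasparro-Dev/Brand_data_extraction | services/brand_audit_extractor.py | extract_certs_from_text
-- ===== SOURCE A (Python) =====
-- CERT_KEYWORDS = [
--     "clinically proven", "dermatologist tested", "dermatologist recommended",
--     "dermatologist formulated", "non-irritant", "cruelty free", "vegan",
--     "organic", "natural", "fda approved", "iso certified", "made safe",
--     "ecocert", "gmp certified", "paraben free", "sulfate free",
--     "fragrance free", "derma",
-- ]
--
-- def extract_certs_from_text(text: str) -> str:
--     """Extract certification keywords from text."""
--     if not text:
--         return "—"
--     text_lower = text.lower()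
--     found = []
--     for kw in CERT_KEYWORDS:
--         if kw in text_lower:
--             found.append(kw.title())
--     # Normalize common certs
--     cleaned = []
--     for c in found:
--         if "Clinically Proven" in c:
--             cleaned.append("Clinically Proven")
--         elif "Dermatologist" in c and "Formulated" in c:
--             cleaned.append("Dermatologist Formulated")
--         elif "Dermatologist" in c and "Tested" in c:
--             cleaned.append("Dermatologist Tested")
--         elif "Dermatologist" in c and "Recommended" in c:
--             cleaned.append("Dermatologist Recommended")
--         elif "Fda" in c:
--             cleaned.append("FDA Approved")
--         elif "Iso" in c:
--             cleaned.append("ISO Certified")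
--         elif "Made Safe" in c:
--             cleaned.append("Made Safe Certified")
--         elif "Gmp" in c:
--             cleaned.append("GMP Certified")
--         else:
--             cleaned.append(c)
--     return ", ".join(sorted(set(cleaned))) if cleaned else "—"
-- ===== SOURCE B (Python) =====
-- # One static table from keyword to its canonical label; single comprehension pass.
-- CANON = {
--     "clinically proven": "Clinically Proven",
--     "dermatologist tested": "Dermatologist Tested",
--     "dermatologist recommended": "Dermatologist Recommended",
--     "dermatologist formulated": "Dermatologist Formulated",
--     "non-irritant": "Non-Irritant",
--     "cruelty free": "Cruelty Free",
--     "vegan": "Vegan",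
--     "organic": "Organic",
--     "natural": "Natural",
--     "fda approved": "FDA Approved",
--     "iso certified": "ISO Certified",
--     "made safe": "Made Safe Certified",
--     "ecocert": "Ecocert",
--     "gmp certified": "GMP Certified",
--     "paraben free": "Paraben Free",
--     "sulfate free": "Sulfate Free",
--     "fragrance free": "Fragrance Free",
--     "derma": "Derma",
-- }
--
-- def extract_certs_from_text(text: str) -> str:
--     """Extract certification keywords from text."""
--     if not text:
--         return "—"
--     low = text.lower()
--     labels = sorted({label for kw, label in CANON.items() if kw in low})
--     return ", ".join(labels) if labels else "—"
-- ===== Notes on version B (the rewrite author's own statement) =====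
-- stated objective: simpler
-- what changed: Replaces A's two passes (collect title-cased matches, then normalize each through a nine-branch elif cascade of substring tests) with a single static keyword-to-canonical-label table scanned once by a set comprehension.
import Mathlib
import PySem

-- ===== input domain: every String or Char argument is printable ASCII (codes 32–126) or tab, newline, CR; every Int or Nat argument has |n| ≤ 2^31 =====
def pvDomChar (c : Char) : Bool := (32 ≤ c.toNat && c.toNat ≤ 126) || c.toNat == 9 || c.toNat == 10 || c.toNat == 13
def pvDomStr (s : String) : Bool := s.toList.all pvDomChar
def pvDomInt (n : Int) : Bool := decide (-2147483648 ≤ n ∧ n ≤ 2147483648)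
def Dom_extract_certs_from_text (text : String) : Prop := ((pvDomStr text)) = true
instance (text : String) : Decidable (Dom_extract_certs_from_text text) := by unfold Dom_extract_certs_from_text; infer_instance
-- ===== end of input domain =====

-- B replaces A's two passes (title-case then a nine-branch elif normalization cascade)
-- with one static keyword→canonical-label table filtered in a single pass (objective: simpler).

-- ===== PORT A =====
-- the module-level CERT_KEYWORDS list
def certKeywords : List String :=
  ["clinically proven", "dermatologist tested", "dermatologist recommended",
   "dermatologist formulated", "non-irritant", "cruelty free", "vegan",
   "organic", "natural", "fda approved", "iso certified", "made safe",
   "ecocert", "gmp certified", "paraben free", "sulfate free",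
   "fragrance free", "derma"]

-- str.title(), hand-ported (PySem has no title): uppercase a letter after a non-letter,
-- lowercase after a letter; exact for the printable-ASCII domain (where cased = alphabetic).
def titleGo (cs : List Char) (prevAlpha : Bool) : List Char :=
  match cs with
  | [] => []
  | c :: rest =>
      (if prevAlpha then PySem.Chars.lowerChar c else PySem.Chars.upperChar c)
        :: titleGo rest (PySem.Chars.isalpha c)

def strTitle (s : String) : String := String.ofList (titleGo s.toList false)

-- the elif cascade of A, branch for branch
def normalizeCert (c : String) : String :=
  if PySem.Str.isIn "Clinically Proven" c then "Clinically Proven"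
  else if PySem.Str.isIn "Dermatologist" c && PySem.Str.isIn "Formulated" c then "Dermatologist Formulated"
  else if PySem.Str.isIn "Dermatologist" c && PySem.Str.isIn "Tested" c then "Dermatologist Tested"
  else if PySem.Str.isIn "Dermatologist" c && PySem.Str.isIn "Recommended" c then "Dermatologist Recommended"
  else if PySem.Str.isIn "Fda" c then "FDA Approved"
  else if PySem.Str.isIn "Iso" c then "ISO Certified"
  else if PySem.Str.isIn "Made Safe" c then "Made Safe Certified"
  else if PySem.Str.isIn "Gmp" c then "GMP Certified"
  else c

def extract_certs_from_text (text : String) : String :=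
  if text = "" then "—"
  else
    let text_lower := PySem.Str.lower text
    let found := certKeywords.foldl
      (fun acc kw => if PySem.Str.isIn kw text_lower then acc ++ [strTitle kw] else acc) []
    let cleaned := found.foldl (fun acc c => acc ++ [normalizeCert c]) []
    if cleaned ≠ [] then
      PySem.Str.join ", " (PySem.List.sorted (PySem.Set.ofList cleaned) (fun x => x) false)
    else "—"

-- ===== PORT B =====
-- the module-level CANON dict of Source B, as an association list in insertion order
def canonTable : List (String × String) :=
  [("clinically proven", "Clinically Proven"),
   ("dermatologist tested", "Dermatologist Tested"),
   ("dermatologist recommended", "Dermatologist Recommended"),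
   ("dermatologist formulated", "Dermatologist Formulated"),
   ("non-irritant", "Non-Irritant"),
   ("cruelty free", "Cruelty Free"),
   ("vegan", "Vegan"),
   ("organic", "Organic"),
   ("natural", "Natural"),
   ("fda approved", "FDA Approved"),
   ("iso certified", "ISO Certified"),
   ("made safe", "Made Safe Certified"),
   ("ecocert", "Ecocert"),
   ("gmp certified", "GMP Certified"),
   ("paraben free", "Paraben Free"),
   ("sulfate free", "Sulfate Free"),
   ("fragrance free", "Fragrance Free"),
   ("derma", "Derma")]

def extract_certs_from_text_alt (text : String) : String :=
  if text = "" then "—"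
  else
    let low := PySem.Str.lower text
    -- sorted({label for kw, label in CANON.items() if kw in low})
    let labels := PySem.List.sorted
      (PySem.Set.ofList ((canonTable.filter (fun pr => PySem.Str.isIn pr.1 low)).map Prod.snd))
      (fun x => x) false
    if labels ≠ [] then PySem.Str.join ", " labels else "—"

-- ===== PRECONDITION & SPEC =====
def Spec_extract_certs_from_text (text : String) (out : String) : Prop := out = extract_certs_from_text_alt text
instance (text : String) (out : String) : Decidable (Spec_extract_certs_from_text text out) := by unfold Spec_extract_certs_from_text; infer_instance

-- ===== CLAIM (what is proved, stated in full; the proofs are below) =====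
def Claim_equal_extract_certs_from_text : Prop := ∀ (text : String), Dom_extract_certs_from_text text → Spec_extract_certs_from_text text (extract_certs_from_text text)

-- ===== LEMMAS AND PROOFS =====

-- B's table is exactly A's keyword list paired with A's normalize∘title of each keyword
lemma canonTable_eq :
    canonTable = certKeywords.map (fun kw => (kw, normalizeCert (strTitle kw))) := by decide

lemma filter_map_snd (f : String → String) (p : String → Bool) (l : List String) :
    ((l.map (fun x => (x, f x))).filter (fun pr => p pr.1)).map Prod.snd
      = (l.filter p).map f := by
  induction l with
  | nil => rfl
  | cons x t ih => by_cases h : p x = true <;> simp [List.filter, h, ih]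

lemma ofList_eq_nil_iff (xs : List String) : PySem.Set.ofList xs = [] ↔ xs = [] := by
  constructor
  · intro h
    cases xs with
    | nil => rfl
    | cons y t =>
        exfalso
        have : y ∈ PySem.Set.ofList (y :: t) := by
          rw [PySem.Set.mem_ofList]; exact List.mem_cons_self
        rw [h] at this; exact absurd this (List.not_mem_nil)
  · intro h; subst h; rfl

-- ===== VERDICT (by name: the statement is the Claim_ definition above) =====
theorem extract_certs_from_text_spec : Claim_equal_extract_certs_from_text := by
  intro text _
  unfold Spec_extract_certs_from_text extract_certs_from_text extract_certs_from_text_alt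
  by_cases hz : text = ""
  · simp [hz]
  · rw [if_neg hz, if_neg hz]
    have hfound := PySem.List.foldl_append_if
      (fun kw => PySem.Str.isIn kw (PySem.Str.lower text)) strTitle certKeywords []
    rw [List.nil_append] at hfound
    have hclean := PySem.List.foldl_append_singleton_eq_map normalizeCert
      ((certKeywords.filter (fun kw => PySem.Str.isIn kw (PySem.Str.lower text))).map strTitle) []
    rw [List.nil_append, List.map_map] at hclean
    have hlist : (canonTable.filter
          (fun pr => PySem.Str.isIn pr.1 (PySem.Str.lower text))).map Prod.snd
        = (certKeywords.filter
          (fun kw => PySem.Str.isIn kw (PySem.Str.lower text))).map (normalizeCert ∘ strTitle) := by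
      rw [canonTable_eq]
      exact filter_map_snd (fun kw => normalizeCert (strTitle kw))
        (fun kw => PySem.Str.isIn kw (PySem.Str.lower text)) certKeywords
    simp only [hfound, hclean, hlist]
    by_cases hnil : (certKeywords.filter
        (fun kw => PySem.Str.isIn kw (PySem.Str.lower text))).map (normalizeCert ∘ strTitle) = []
    · simp only [hnil]
      rw [if_neg (by simp), if_neg (by simp [PySem.List.sorted_eq_nil_iff, PySem.Set.ofList])]
    · have hset : PySem.Set.ofList ((certKeywords.filter
          (fun kw => PySem.Str.isIn kw (PySem.Str.lower text))).map (normalizeCert ∘ strTitle)) ≠ [] := by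
        intro h; exact hnil ((ofList_eq_nil_iff _).mp h)
      have hs : PySem.List.sorted (PySem.Set.ofList ((certKeywords.filter
          (fun kw => PySem.Str.isIn kw (PySem.Str.lower text))).map (normalizeCert ∘ strTitle)))
          (fun x => x) false ≠ [] := by
        intro h; exact hset ((PySem.List.sorted_eq_nil_iff _ _ _).mp h)
      rw [if_pos hnil, if_pos hs]
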